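-- pv_equiv track=rewrite | github.com/mp-c3-h8/Advent-of-Code-2017 | day17/day17.py | spinlock
-- ===== SOURCE A (Python) =====
-- from collections import deque
--
-- def spinlock(steps: int) -> int:
--     buffer = deque([0])
--     for i in range(1, 2017 + 1):
--         rot = (steps+1) % i  # i == len(buffer)
--         buffer.rotate(-rot)
--         buffer.appendleft(i)
--     buffer.rotate(-1)
--     res = buffer.popleft()
--     return res
-- ===== SOURCE B (Python) =====
-- def spinlock(steps: int) -> int:
--     buffer = [0]
--     pos = 0
--     for i in range(1, 2017 + 1):
--         pos = (pos + steps) % len(buffer) + 1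
--         buffer.insert(pos, i)
--     return buffer[(pos + 1) % len(buffer)]
-- ===== Notes on version B (the rewrite author's own statement) =====
-- stated objective: idiomatic
-- what changed: Replaces the rotating deque (which brings the newest element to the front each iteration) by a plain list with fixed absolute positions and an integer cursor: compute the next insertion index modulo the current length, insert there, and finally read the list entry just after the cursor.
import Mathlib
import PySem

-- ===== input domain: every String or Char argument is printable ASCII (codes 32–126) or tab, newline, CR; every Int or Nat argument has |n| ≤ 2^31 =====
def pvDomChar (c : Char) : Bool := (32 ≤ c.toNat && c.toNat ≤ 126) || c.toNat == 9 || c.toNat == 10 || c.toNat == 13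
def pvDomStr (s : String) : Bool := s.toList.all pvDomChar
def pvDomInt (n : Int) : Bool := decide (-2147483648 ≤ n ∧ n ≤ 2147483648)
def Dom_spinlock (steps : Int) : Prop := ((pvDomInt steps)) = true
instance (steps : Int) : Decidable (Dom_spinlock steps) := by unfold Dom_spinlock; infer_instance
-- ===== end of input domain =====

-- B keeps absolute positions in a plain list with an integer cursor instead of A's rotating deque
-- (which moves the newest element to the front each iteration); return value only, same cost class.

-- ===== PORT A =====
-- loop body of A: rot = (steps+1) % i; buffer.rotate(-rot); buffer.appendleft(i)
-- deque.rotate(-rot) with 0 ≤ rot rotates left by rot, which is List.rotate rot (rot = (steps+1) % i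
-- is nonnegative since i ≥ 1, so .toNat is exact); appendleft is cons.
def stepA (steps : Int) (buf : List Int) (i : Int) : List Int :=
  let rot := PySem.Int.mod (steps + 1) i
  i :: buf.rotate rot.toNat

def spinlock (steps : Int) : Int :=
  let buffer := (PySem.List.pyRange 1 (2017 + 1) 1).foldl (stepA steps) [0]
  -- buffer.rotate(-1); res = buffer.popleft(): buffer has 2018 elements, so popleft on the
  -- rotated deque is its head; headD 0 is exact because buffer is never empty.
  ((buffer.rotate 1).headD 0)

-- ===== PORT B =====
-- loop body of B: pos = (pos + steps) % len(buffer) + 1; buffer.insert(pos, i)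
def stepB (steps : Int) (st : List Int × Int) (i : Int) : List Int × Int :=
  let pos := PySem.Int.mod (st.2 + steps) ((st.1.length : Int)) + 1
  (PySem.List.insert st.1 pos i, pos)

def spinlock_alt (steps : Int) : Int :=
  let st := (PySem.List.pyRange 1 (2017 + 1) 1).foldl (stepB steps) ([0], 0)
  -- buffer[(pos + 1) % len(buffer)]: the index is in [0, len), so pyGetD is exact.
  PySem.List.pyGetD st.1 (PySem.Int.mod (st.2 + 1) ((st.1.length : Int))) 0

-- ===== PRECONDITION & SPEC =====
def Spec_spinlock (steps : Int) (out : Int) : Prop := out = spinlock_alt steps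
instance (steps : Int) (out : Int) : Decidable (Spec_spinlock steps out) := by unfold Spec_spinlock; infer_instance

-- ===== CLAIM (what is proved, stated in full; the proofs are below) =====
def Claim_equal_spinlock : Prop := ∀ (steps : Int), Dom_spinlock steps → Spec_spinlock steps (spinlock steps)

-- ===== LEMMAS AND PROOFS =====

-- modular arithmetic core: A's accumulated rotation and B's cursor agree mod the buffer length
lemma key_arith (m p s : Int) (hm : 0 < m) (hp : 0 ≤ p) :
    (p.toNat + ((s + 1) % m).toNat) % m.toNat = ((p + s) % m + 1).toNat % m.toNat := by
  have hm0 : m ≠ 0 := ne_of_gt hm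
  have h1 : 0 ≤ (s + 1) % m := Int.emod_nonneg _ hm0
  have h2 : 0 ≤ (p + s) % m + 1 := by have := Int.emod_nonneg (p + s) hm0; omega
  apply Int.natCast_inj.mp
  push_cast [Int.toNat_of_nonneg h1, Int.toNat_of_nonneg h2, Int.toNat_of_nonneg hp,
    Int.toNat_of_nonneg (le_of_lt hm)]
  have e1 : (p + (s + 1) % m) % m = (p + (s + 1)) % m :=
    Int.ModEq.add_left p (Int.emod_emod_of_dvd (s + 1) dvd_rfl)
  have e2 : ((p + s) % m + 1) % m = ((p + s) + 1) % m :=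
    Int.ModEq.add_right 1 (Int.emod_emod_of_dvd (p + s) dvd_rfl)
  rw [e1, e2, show p + (s + 1) = p + s + 1 by ring]

-- loop invariant: after k iterations A's deque is B's buffer rotated so B's cursor is at the front
lemma loop_inv (steps : Int) (k : Nat) :
    ∃ (L : List Int) (p : Int),
      (PySem.List.pyRange 1 (1 + (k : Int)) 1).foldl (stepB steps) ([0], 0) = (L, p) ∧
      (PySem.List.pyRange 1 (1 + (k : Int)) 1).foldl (stepA steps) [0] = L.rotate p.toNat ∧
      L.length = k + 1 ∧ 0 ≤ p ∧ p ≤ (k : Int) := by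
  induction k with
  | zero =>
      refine ⟨[0], 0, ?_, ?_, rfl, le_refl 0, le_refl 0⟩ <;> simp
  | succ k ih =>
      obtain ⟨L, p, hB, hA, hlen, hp0, hpk⟩ := ih
      have hsplit : PySem.List.pyRange 1 (1 + ((k + 1 : Nat) : Int)) 1
          = PySem.List.pyRange 1 (1 + (k : Int)) 1 ++ [1 + (k : Int)] := by
        have := PySem.List.pyRange_one_succ_right (a := 1) (b := 1 + (k : Int)) (by omega)
        rw [show (1 + ((k + 1 : Nat) : Int)) = 1 + (k : Int) + 1 by push_cast; ring, this]
      rw [hsplit, List.foldl_append, List.foldl_append, hB, hA]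
      simp only [List.foldl_cons, List.foldl_nil]
      -- abbreviations for the single step at i = 1 + k
      set m : Int := ((k : Int) + 1) with hm
      have hmpos : (0 : Int) < m := by omega
      have hLlen : ((L.length : Int)) = m := by rw [hlen]; push_cast; ring
      have hrotmod : PySem.Int.mod (steps + 1) (1 + (k : Int)) = (steps + 1) % m := by
        rw [PySem.Int.mod_eq_emod_of_pos (by omega)]; congr 1; rw [hm]; ring
      have hposmod : PySem.Int.mod (p + steps) ((L.length : Int)) = (p + steps) % m := by
        rw [hLlen, PySem.Int.mod_eq_emod_of_pos hmpos]
      set pos' : Int := (p + steps) % m + 1 with hpos'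
      have hpos'lb : 1 ≤ pos' := by have := Int.emod_nonneg (p + steps) (ne_of_gt hmpos); omega
      have hpos'ub : pos' ≤ m := by have := Int.emod_lt_of_pos (p + steps) hmpos; omega
      set q : Nat := pos'.toNat with hq
      have hqcast : (q : Int) = pos' := Int.toNat_of_nonneg (by omega)
      have hqle : q ≤ L.length := by omega
      have hins : PySem.List.insert L pos' (1 + (k : Int))
          = L.take q ++ (1 + (k : Int)) :: L.drop q := by
        rw [← hqcast, PySem.List.insert_natCast L q _ hqle]
      refine ⟨L.take q ++ (1 + (k : Int)) :: L.drop q, pos', ?_, ?_, ?_, by omega, by push_cast; omega⟩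
      · simp only [stepB, hposmod, ← hpos', hins]
      · -- rotation step agrees with cursor step
        simp only [stepA, hrotmod]
        have htq : (L.take q).length = q := by simp [hqle]
        have hq' : q ≤ (L.take q ++ (1 + (k : Int)) :: L.drop q).length := by simp; omega
        rw [List.rotate_eq_drop_append_take hq', List.drop_left' htq, List.take_left' htq,
          List.rotate_rotate]
        have hrot : L.rotate (p.toNat + ((steps + 1) % m).toNat) = L.rotate q := by
          rw [← List.rotate_mod, ← List.rotate_mod L q]
          have hlm : L.length = m.toNat := by omega
          rw [hlm]
          have hk := key_arith m p steps hmpos hp0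
          have hqeq : q = ((p + steps) % m + 1).toNat := by rw [hq, hpos']
          rw [hqeq]
          exact congrArg L.rotate hk
        rw [hrot, List.rotate_eq_drop_append_take hqle]
        simp
      · simp; omega

-- ===== VERDICT (by name: the statement is the Claim_ definition above) =====
theorem spinlock_spec : Claim_equal_spinlock := by
  intro steps _
  unfold Spec_spinlock
  simp only [spinlock, spinlock_alt]
  obtain ⟨L, p, hB, hA, hlen, hp0, hpk⟩ := loop_inv steps 2017
  rw [show (2017 : Int) + 1 = 1 + ((2017 : Nat) : Int) by norm_num, hB, hA]
  have hlenZ : ((L.length : Nat) : Int) = 2018 := by rw [hlen]; norm_num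
  have hmod : PySem.Int.mod (p + 1) ((L.length : Int)) = (p + 1) % 2018 := by
    rw [hlenZ, PySem.Int.mod_eq_emod_of_pos (by norm_num)]
  set j : Nat := ((p + 1) % 2018).toNat with hj
  have hj0 : 0 ≤ (p + 1) % 2018 := Int.emod_nonneg _ (by norm_num)
  have hjlt : j < 2018 := by
    have := Int.emod_lt_of_pos (p + 1) (show (0 : Int) < 2018 by norm_num); omega
  have hjltL : j < L.length := by omega
  have hrot : (L.rotate p.toNat).rotate 1 = L.rotate j := by
    rw [List.rotate_rotate, ← List.rotate_mod, ← List.rotate_mod L j, hlen]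
    exact congrArg L.rotate (by omega)
  dsimp only
  rw [hrot, hmod, PySem.List.pyGetD_eq_getElem L 0 hj0 (by omega),
    List.headD_eq_head?_getD, List.head?_rotate hjltL, List.getElem?_eq_getElem hjltL]
  rfl
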